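-- pv_equiv track=rewrite | github.com/varunsripad123/sentineldf | backend/detectors/heuristic_detector.py | _windowed_cooccur
-- ===== SOURCE A (Python) =====
-- from typing import Any, Dict, List
--
-- def _windowed_cooccur(tokens: List[str], a: str, b: str, window: int = 6) -> bool:
--     """Return True if words a and b occur within a sliding window of size `window`.
--
--     Args:
--         tokens: List of normalized tokens.
--         a: First word to search for.
--         b: Second word to search for.
--         window: Maximum distance between words.
--
--     Returns:
--         True if words co-occur within window.
--     """
--     # Find indices where token == target
--     ia = [i for i, t in enumerate(tokens) if a in t]
--     ib = [i for i, t in enumerate(tokens) if b in t]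
--     if not ia or not ib:
--         return False
--     for i in ia:
--         # Early exit if any j is close
--         for j in ib:
--             if abs(i - j) <= window:
--                 return True
--     return False
-- ===== SOURCE B (Python) =====
-- def _windowed_cooccur(tokens, a, b, window=6):
--     """Single pass: track the last index containing a and the last containing b;
--     report True as soon as the two last-seen indices are within `window`."""
--     last_a = None
--     last_b = None
--     for i, t in enumerate(tokens):
--         if a in t:
--             last_a = i
--         if b in t:
--             last_b = i
--         if last_a is not None and last_b is not None and abs(last_a - last_b) <= window:
--             return True
--     return False
-- ===== Notes on version B (the rewrite author's own statement) =====
-- stated objective: faster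
-- what changed: Replaced building two full index lists plus a nested all-pairs scan with a single pass over the tokens that tracks the last index containing each word and returns as soon as the two last-seen indices are within the window.
import Mathlib
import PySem

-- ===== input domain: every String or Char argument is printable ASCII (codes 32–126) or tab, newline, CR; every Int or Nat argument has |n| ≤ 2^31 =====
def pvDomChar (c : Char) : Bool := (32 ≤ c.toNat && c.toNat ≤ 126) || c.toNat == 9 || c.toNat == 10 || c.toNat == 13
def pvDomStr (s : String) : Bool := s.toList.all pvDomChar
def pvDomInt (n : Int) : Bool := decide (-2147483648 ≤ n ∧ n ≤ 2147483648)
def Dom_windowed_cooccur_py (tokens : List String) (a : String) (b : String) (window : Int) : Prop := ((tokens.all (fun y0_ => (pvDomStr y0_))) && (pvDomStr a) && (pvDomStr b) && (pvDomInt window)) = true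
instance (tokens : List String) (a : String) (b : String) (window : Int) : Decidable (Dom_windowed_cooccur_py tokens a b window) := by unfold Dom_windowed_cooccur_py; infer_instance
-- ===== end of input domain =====

-- B replaces A's two index-list builds plus nested pair scan by a single pass that
-- tracks the last index containing each word: O(n) instead of O(n + |ia|*|ib|).


-- ===== PORT A =====
-- ia = [i for i, t in enumerate(tokens) if a in t]; ib likewise; guard on emptiness;
-- then the nested loops with early exit = ia.any (fun i => ib.any …)
def windowed_cooccur_py (tokens : List String) (a : String) (b : String) (window : Int) : Bool :=
  let ia := ((PySem.List.enumerate tokens).filter (fun p => PySem.Str.isIn a p.2)).map (fun p => p.1)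
  let ib := ((PySem.List.enumerate tokens).filter (fun p => PySem.Str.isIn b p.2)).map (fun p => p.1)
  if ia.isEmpty || ib.isEmpty then false
  else ia.any (fun i => ib.any (fun j => decide (|i - j| ≤ window)))

-- ===== PORT B =====
-- 'last_a is not None and last_b is not None and abs(last_a - last_b) <= window'
def hitB (window : Int) : Option Int → Option Int → Bool
  | some x, some y => decide (|x - y| ≤ window)
  | _, _ => false

-- the single pass of Source B: update last-seen indices, early return on a close pair
def goB (a b : String) (window : Int) : List String → Int → Option Int → Option Int → Bool
  | [], _, _, _ => false
  | t :: rest, i, lA, lB =>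
    let lA' := if PySem.Str.isIn a t then some i else lA
    let lB' := if PySem.Str.isIn b t then some i else lB
    if hitB window lA' lB' then true else goB a b window rest (i + 1) lA' lB'

def windowed_cooccur_py_alt (tokens : List String) (a : String) (b : String) (window : Int) : Bool :=
  goB a b window tokens 0 none none

-- ===== PRECONDITION & SPEC =====
def Spec_windowed_cooccur_py (tokens : List String) (a : String) (b : String) (window : Int) (out : Bool) : Prop := out = windowed_cooccur_py_alt tokens a b window
instance (tokens : List String) (a : String) (b : String) (window : Int) (out : Bool) : Decidable (Spec_windowed_cooccur_py tokens a b window out) := by unfold Spec_windowed_cooccur_py; infer_instance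

-- ===== CLAIM (what is proved, stated in full; the proofs are below) =====
def Claim_equal_windowed_cooccur_py : Prop := ∀ (tokens : List String) (a : String) (b : String) (window : Int), Dom_windowed_cooccur_py tokens a b window → Spec_windowed_cooccur_py tokens a b window (windowed_cooccur_py tokens a b window)

-- ===== LEMMAS AND PROOFS =====

-- "some token containing a and some token containing b lie within `window` of each other"
def PairIn (a b : String) (w : Int) (ts : List String) : Prop :=
  ∃ (k l : Nat) (hk : k < ts.length) (hl : l < ts.length),
    PySem.Str.isIn a ts[k] = true ∧ PySem.Str.isIn b ts[l] = true ∧ |(k : Int) - (l : Int)| ≤ w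

lemma hitB_eq_true (w : Int) (lA lB : Option Int) :
    hitB w lA lB = true ↔ ∃ x y, lA = some x ∧ lB = some y ∧ |x - y| ≤ w := by
  cases lA <;> cases lB <;> simp [hitB]

lemma mem_idx_list (tokens : List String) (s : String) (i : Int) :
    i ∈ ((PySem.List.enumerate tokens).filter (fun p => PySem.Str.isIn s p.2)).map (fun p => p.1) ↔
    ∃ (k : Nat) (_ : k < tokens.length), i = (k : Int) ∧ PySem.Str.isIn s tokens[k] = true := by
  simp only [List.mem_map, List.mem_filter, PySem.List.mem_enumerate_iff]
  constructor
  · rintro ⟨p, ⟨⟨k, hk, rfl⟩, hq⟩, hi⟩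
    exact ⟨k, hk, by simpa using hi.symm, by simpa using hq⟩
  · rintro ⟨k, hk, rfl, hq⟩
    exact ⟨(0 + (k : Int), tokens[k]), ⟨⟨k, hk, rfl⟩, by simpa using hq⟩, by simp⟩

lemma A_iff (tokens : List String) (a b : String) (w : Int) :
    windowed_cooccur_py tokens a b w = true ↔ PairIn a b w tokens := by
  have hguard : windowed_cooccur_py tokens a b w =
      (((PySem.List.enumerate tokens).filter (fun p => PySem.Str.isIn a p.2)).map (fun p => p.1)).any
        (fun i => (((PySem.List.enumerate tokens).filter (fun p => PySem.Str.isIn b p.2)).map (fun p => p.1)).any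
          (fun j => decide (|i - j| ≤ w))) := by
    by_cases h : ((((PySem.List.enumerate tokens).filter (fun p => PySem.Str.isIn a p.2)).map (fun p => p.1)).isEmpty ||
        (((PySem.List.enumerate tokens).filter (fun p => PySem.Str.isIn b p.2)).map (fun p => p.1)).isEmpty) = true
    · have hL : windowed_cooccur_py tokens a b w = false := by
        simp only [windowed_cooccur_py]
        rw [if_pos h]
      rw [hL, eq_comm, List.any_eq_false]
      intro x hx
      simp only [Bool.or_eq_true, List.isEmpty_iff] at h
      rcases h with h | h
      · exact absurd hx (by rw [h]; simp)
      · rw [h]; simp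
    · simp only [windowed_cooccur_py]
      rw [if_neg h]
  rw [hguard]
  simp only [List.any_eq_true, decide_eq_true_eq]
  constructor
  · rintro ⟨i, hi, j, hj, hw⟩
    rcases (mem_idx_list tokens a i).mp hi with ⟨k, hk, rfl, hka⟩
    rcases (mem_idx_list tokens b j).mp hj with ⟨l, hl, rfl, hlb⟩
    exact ⟨k, l, hk, hl, hka, hlb, hw⟩
  · rintro ⟨k, l, hk, hl, hka, hlb, hw⟩
    exact ⟨k, (mem_idx_list tokens a _).mpr ⟨k, hk, rfl, hka⟩,
           l, (mem_idx_list tokens b _).mpr ⟨l, hl, rfl, hlb⟩, hw⟩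

lemma PairIn_cons (t : String) {a b : String} {w : Int} {rest : List String}
    (h : PairIn a b w rest) : PairIn a b w (t :: rest) := by
  rcases h with ⟨k, l, hk, hl, ha, hb, hw⟩
  refine ⟨k + 1, l + 1, by simpa using hk, by simpa using hl, by simpa using ha, by simpa using hb, ?_⟩
  have : ((k + 1 : Nat) : Int) - ((l + 1 : Nat) : Int) = (k : Int) - (l : Int) := by push_cast; ring
  rw [this]; exact hw

lemma goB_sound (a b : String) (w : Int) :
    ∀ (ts : List String) (i : Int) (lA lB : Option Int),
    goB a b w ts i lA lB = true →
    PairIn a b w ts ∨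
    (∃ x, lA = some x ∧ ∃ (l : Nat) (_ : l < ts.length), PySem.Str.isIn b ts[l] = true ∧ |x - (i + l)| ≤ w) ∨
    (∃ y, lB = some y ∧ ∃ (k : Nat) (_ : k < ts.length), PySem.Str.isIn a ts[k] = true ∧ |(i + k) - y| ≤ w) ∨
    (∃ x y, lA = some x ∧ lB = some y ∧ |x - y| ≤ w) := by
  intro ts
  induction ts with
  | nil => intro i lA lB h; simp [goB] at h
  | cons t rest ih =>
    intro i lA lB h
    simp only [goB] at h
    set lA' := if PySem.Str.isIn a t then some i else lA with hlA'
    set lB' := if PySem.Str.isIn b t then some i else lB with hlB'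
    by_cases hhit : hitB w lA' lB' = true
    · rcases (hitB_eq_true w lA' lB').mp hhit with ⟨x, y, hx, hy, hxy⟩
      by_cases hA : PySem.Str.isIn a t = true <;> by_cases hB : PySem.Str.isIn b t = true <;>
        simp only [hA, hB, if_pos, if_neg, Bool.not_eq_true] at hlA' hlB'
      · -- both match: pair (0,0)
        left
        have hxi : x = i := by rw [hlA'] at hx; exact (Option.some_inj.mp hx).symm
        have hyi : y = i := by rw [hlB'] at hy; exact (Option.some_inj.mp hy).symm
        have h0 : (0 : Int) ≤ w := by rw [hxi, hyi] at hxy; simpa using hxy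
        refine ⟨0, 0, by simp, by simp, by simpa using hA, by simpa using hB, by simpa using h0⟩
      · -- a matches, lB old
        right; right; left
        have hxi : x = i := by rw [hlA'] at hx; exact (Option.some_inj.mp hx).symm
        refine ⟨y, by rw [hlB'] at hy; exact hy, 0, by simp, by simpa using hA, ?_⟩
        have : (i + ((0 : Nat) : Int)) = i := by push_cast; ring
        rw [this]; rw [hxi] at hxy; exact hxy
      · -- b matches, lA old
        right; left
        have hyi : y = i := by rw [hlB'] at hy; exact (Option.some_inj.mp hy).symm
        refine ⟨x, by rw [hlA'] at hx; exact hx, 0, by simp, by simpa using hB, ?_⟩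
        have : (i + ((0 : Nat) : Int)) = i := by push_cast; ring
        rw [this]; rw [hyi] at hxy; exact hxy
      · right; right; right
        exact ⟨x, y, by rw [hlA'] at hx; exact hx, by rw [hlB'] at hy; exact hy, hxy⟩
    · rw [if_neg hhit] at h
      have hstep : (PySem.Str.isIn a t = true ∧ lA' = some i) ∨ (PySem.Str.isIn a t = false ∧ lA' = lA) := by
        by_cases hA : PySem.Str.isIn a t = true
        · exact Or.inl ⟨hA, by rw [hlA', if_pos hA]⟩
        · exact Or.inr ⟨by simpa using hA, by rw [hlA', if_neg hA]⟩
      have hstepB : (PySem.Str.isIn b t = true ∧ lB' = some i) ∨ (PySem.Str.isIn b t = false ∧ lB' = lB) := by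
        by_cases hB : PySem.Str.isIn b t = true
        · exact Or.inl ⟨hB, by rw [hlB', if_pos hB]⟩
        · exact Or.inr ⟨by simpa using hB, by rw [hlB', if_neg hB]⟩
      rcases ih (i + 1) lA' lB' h with hp | ⟨x, hx, l, hl, hb', hw'⟩ | ⟨y, hy, k, hk, ha', hw'⟩ | ⟨x, y, hx, hy, hxy⟩
      · exact Or.inl (PairIn_cons t hp)
      · -- b-position l in rest, lA' = some x
        rcases hstep with ⟨hA, hEq⟩ | ⟨hA, hEq⟩
        · -- x = i, a at head: pair (0, l+1)
          have hxi : x = i := (Option.some_inj.mp (hEq.symm.trans hx)).symm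
          left
          refine ⟨0, l + 1, by simp, by simpa using hl, by simpa using hA, by simpa using hb', ?_⟩
          have h1 : ((0 : Nat) : Int) - ((l + 1 : Nat) : Int) = -(l + 1) := by push_cast; ring
          rw [h1]
          rw [abs_le] at hw' ⊢
          rw [hxi] at hw'
          omega
        · right; left
          refine ⟨x, hEq ▸ hx, l + 1, by simpa using hl, by simpa using hb', ?_⟩
          have h1 : (i + ((l + 1 : Nat) : Int)) = (i + 1) + (l : Int) := by push_cast; ring
          rw [h1]; exact hw'
      · rcases hstepB with ⟨hB, hEq⟩ | ⟨hB, hEq⟩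
        · have hyi : y = i := (Option.some_inj.mp (hEq.symm.trans hy)).symm
          left
          refine ⟨k + 1, 0, by simpa using hk, by simp, by simpa using ha', by simpa using hB, ?_⟩
          have h1 : ((k + 1 : Nat) : Int) - ((0 : Nat) : Int) = (k : Int) + 1 := by push_cast; ring
          rw [h1]
          rw [abs_le] at hw' ⊢
          rw [hyi] at hw'
          omega
        · right; right; left
          refine ⟨y, hEq ▸ hy, k + 1, by simpa using hk, by simpa using ha', ?_⟩
          have h1 : (i + ((k + 1 : Nat) : Int)) = (i + 1) + (k : Int) := by push_cast; ring
          rw [h1]; exact hw'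
      · rcases hstep with ⟨hA, hEqA⟩ | ⟨hA, hEqA⟩ <;> rcases hstepB with ⟨hB, hEqB⟩ | ⟨hB, hEqB⟩
        · have hxi : x = i := (Option.some_inj.mp (hEqA.symm.trans hx)).symm
          have hyi : y = i := (Option.some_inj.mp (hEqB.symm.trans hy)).symm
          left
          refine ⟨0, 0, by simp, by simp, by simpa using hA, by simpa using hB, ?_⟩
          rw [hxi, hyi] at hxy
          simpa using hxy
        · have hxi : x = i := (Option.some_inj.mp (hEqA.symm.trans hx)).symm
          right; right; left
          refine ⟨y, hEqB ▸ hy, 0, by simp, by simpa using hA, ?_⟩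
          have h1 : (i + ((0 : Nat) : Int)) = i := by push_cast; ring
          rw [h1]
          rw [hxi] at hxy; exact hxy
        · have hyi : y = i := (Option.some_inj.mp (hEqB.symm.trans hy)).symm
          right; left
          refine ⟨x, hEqA ▸ hx, 0, by simp, by simpa using hB, ?_⟩
          have h1 : (i + ((0 : Nat) : Int)) = i := by push_cast; ring
          rw [h1]
          rw [hyi] at hxy; exact hxy
        · exact Or.inr (Or.inr (Or.inr ⟨x, y, hEqA ▸ hx, hEqB ▸ hy, hxy⟩))

lemma goB_complete (a b : String) (w : Int) :
    ∀ (ts : List String) (i : Int) (lA lB : Option Int),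
    (∀ x, lA = some x → x < i) → (∀ y, lB = some y → y < i) →
    (PairIn a b w ts ∨
     (∃ x, lA = some x ∧ ∃ (l : Nat) (_ : l < ts.length), PySem.Str.isIn b ts[l] = true ∧ |x - (i + l)| ≤ w) ∨
     (∃ y, lB = some y ∧ ∃ (k : Nat) (_ : k < ts.length), PySem.Str.isIn a ts[k] = true ∧ |(i + k) - y| ≤ w)) →
    goB a b w ts i lA lB = true := by
  intro ts
  induction ts with
  | nil =>
    intro i lA lB _ _ hyp
    rcases hyp with ⟨k, l, hk, hl, _⟩ | ⟨x, _, l, hl, _⟩ | ⟨y, _, k, hk, _⟩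
    · exact absurd hk (by simp)
    · exact absurd hl (by simp)
    · exact absurd hk (by simp)
  | cons t rest ih =>
    intro i lA lB hbA hbB hyp
    simp only [goB]
    set lA' := if PySem.Str.isIn a t then some i else lA with hlA'
    set lB' := if PySem.Str.isIn b t then some i else lB with hlB'
    by_cases hhit : hitB w lA' lB' = true
    · rw [if_pos hhit]
    · rw [if_neg hhit]
      have hbA' : ∀ x, lA' = some x → x < i + 1 := by
        intro x hx
        rw [hlA'] at hx
        split_ifs at hx with hA
        · have : x = i := (Option.some_inj.mp hx).symm
          omega
        · have := hbA x hx; omega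
      have hbB' : ∀ y, lB' = some y → y < i + 1 := by
        intro y hy
        rw [hlB'] at hy
        split_ifs at hy with hB
        · have : y = i := (Option.some_inj.mp hy).symm
          omega
        · have := hbB y hy; omega
      apply ih (i + 1) lA' lB' hbA' hbB'
      rcases hyp with ⟨k, l, hk, hl, ha, hb, hw⟩ | ⟨x, hx, l, hl, hb, hw⟩ | ⟨y, hy, k, hk, ha, hw⟩
      · -- a pair inside t :: rest
        match k, l with
        | 0, 0 =>
          -- both words in t: the hit fires, contradiction with hhit
          exfalso
          apply hhit
          have hA : PySem.Str.isIn a t = true := by simpa using ha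
          have hB : PySem.Str.isIn b t = true := by simpa using hb
          rw [hlA', if_pos hA, hlB', if_pos hB]
          apply (hitB_eq_true w (some i) (some i)).mpr
          refine ⟨i, i, rfl, rfl, ?_⟩
          simp only [sub_self, abs_zero]
          have h0 : |((0 : Nat) : Int) - ((0 : Nat) : Int)| ≤ w := hw
          simpa using h0
        | 0, l + 1 =>
          right; left
          have hA : PySem.Str.isIn a t = true := by simpa using ha
          refine ⟨i, by rw [hlA', if_pos hA], l, by simpa using hl, by simpa using hb, ?_⟩
          have h1 : |i - (i + 1 + (l : Int))| = ((l : Int) + 1) := by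
            rw [abs_sub_comm]
            have : i + 1 + (l : Int) - i = (l : Int) + 1 := by ring
            rw [this, abs_of_nonneg (by positivity)]
          rw [h1]
          have h0 : |((0 : Nat) : Int) - ((l + 1 : Nat) : Int)| ≤ w := hw
          rw [abs_le] at h0
          push_cast at h0
          omega
        | k + 1, 0 =>
          right; right
          have hB : PySem.Str.isIn b t = true := by simpa using hb
          refine ⟨i, by rw [hlB', if_pos hB], k, by simpa using hk, by simpa using ha, ?_⟩
          have h1 : |i + 1 + (k : Int) - i| = ((k : Int) + 1) := by
            have : i + 1 + (k : Int) - i = (k : Int) + 1 := by ring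
            rw [this, abs_of_nonneg (by positivity)]
          rw [h1]
          have h0 : |((k + 1 : Nat) : Int) - ((0 : Nat) : Int)| ≤ w := hw
          rw [abs_le] at h0
          push_cast at h0
          omega
        | k + 1, l + 1 =>
          left
          refine ⟨k, l, by simpa using hk, by simpa using hl, by simpa using ha, by simpa using hb, ?_⟩
          have h0 : |((k + 1 : Nat) : Int) - ((l + 1 : Nat) : Int)| ≤ w := hw
          rw [abs_le] at h0 ⊢
          push_cast at h0 ⊢
          omega
      · -- lA = some x (x < i) with a b-position l in t :: rest
        have hxlt : x < i := hbA x hx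
        match l with
        | 0 =>
          -- b in t: the hit fires, contradiction with hhit
          exfalso
          apply hhit
          have hB : PySem.Str.isIn b t = true := by simpa using hb
          have hwx : |x - i| ≤ w := by
            have h0 : |x - (i + ((0 : Nat) : Int))| ≤ w := hw
            simpa using h0
          rw [hlB', if_pos hB]
          apply (hitB_eq_true w lA' (some i)).mpr
          rw [hlA']
          split_ifs with hA
          · refine ⟨i, i, rfl, rfl, ?_⟩
            rw [abs_le] at hwx
            simp only [sub_self, abs_zero]
            omega
          · exact ⟨x, i, hx, rfl, hwx⟩
        | l + 1 =>
          right; left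
          rw [hlA']
          split_ifs with hA
          · refine ⟨i, rfl, l, by simpa using hl, by simpa using hb, ?_⟩
            have h0 : |x - (i + ((l + 1 : Nat) : Int))| ≤ w := hw
            rw [abs_le] at h0 ⊢
            push_cast at h0 ⊢
            omega
          · refine ⟨x, hx, l, by simpa using hl, by simpa using hb, ?_⟩
            have h0 : |x - (i + ((l + 1 : Nat) : Int))| ≤ w := hw
            rw [abs_le] at h0 ⊢
            push_cast at h0 ⊢
            omega
      · -- lB = some y (y < i) with an a-position k in t :: rest
        have hylt : y < i := hbB y hy
        match k with
        | 0 =>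
          exfalso
          apply hhit
          have hA : PySem.Str.isIn a t = true := by simpa using ha
          have hwy : |i - y| ≤ w := by
            have h0 : |i + ((0 : Nat) : Int) - y| ≤ w := hw
            simpa using h0
          rw [hlA', if_pos hA]
          apply (hitB_eq_true w (some i) lB').mpr
          rw [hlB']
          split_ifs with hB
          · refine ⟨i, i, rfl, rfl, ?_⟩
            rw [abs_le] at hwy
            simp only [sub_self, abs_zero]
            omega
          · exact ⟨i, y, rfl, hy, hwy⟩
        | k + 1 =>
          right; right
          rw [hlB']
          split_ifs with hB
          · refine ⟨i, rfl, k, by simpa using hk, by simpa using ha, ?_⟩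
            have h0 : |i + ((k + 1 : Nat) : Int) - y| ≤ w := hw
            rw [abs_le] at h0 ⊢
            push_cast at h0 ⊢
            omega
          · refine ⟨y, hy, k, by simpa using hk, by simpa using ha, ?_⟩
            have h0 : |i + ((k + 1 : Nat) : Int) - y| ≤ w := hw
            rw [abs_le] at h0 ⊢
            push_cast at h0 ⊢
            omega

lemma B_iff (tokens : List String) (a b : String) (w : Int) :
    windowed_cooccur_py_alt tokens a b w = true ↔ PairIn a b w tokens := by
  constructor
  · intro h
    rcases goB_sound a b w tokens 0 none none h with h | h | h | h
    · exact h
    all_goals simp_all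
  · intro h
    exact goB_complete a b w tokens 0 none none (by simp) (by simp) (Or.inl h)

-- ===== VERDICT (by name: the statement is the Claim_ definition above) =====
theorem windowed_cooccur_py_spec : Claim_equal_windowed_cooccur_py := by
  intro tokens a b w _
  unfold Spec_windowed_cooccur_py
  have := (A_iff tokens a b w).trans (B_iff tokens a b w).symm
  exact Bool.coe_iff_coe.mp this
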